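-- pv_equiv track=rewrite | github.com/riasat97/Structy-Hub | Stack/122-reverse-some-chars/reverse-some-chars.py | reverse_some_chars
-- ===== SOURCE A (Python) =====
-- def reverse_some_chars(s, chars):
--   chars_set=set(chars)
--   stack=[]
--   res=[]
--   for ch in s:
--     if ch in chars_set:
--       stack.append(ch)
--   for ch in s:
--     if ch in chars_set:
--       res.append(stack.pop())
--     else:
--       res.append(ch)
--   return ''.join(res)
-- ===== SOURCE B (Python) =====
-- def reverse_some_chars(s, chars):
--     chars_set = set(chars)
--     lst = list(s)
--     i, j = 0, len(lst) - 1
--     while i < j: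
--         if lst[i] not in chars_set:
--             i += 1
--         elif lst[j] not in chars_set:
--             j -= 1
--         else:
--             lst[i], lst[j] = lst[j], lst[i]
--             i += 1
--             j -= 1
--     return ''.join(lst)
-- ===== Notes on version B (the rewrite author's own statement) =====
-- stated objective: alternative
-- what changed: Replaces A's stack-collect pass plus rebuild pass (with an auxiliary stack list) by a single converging two-pointer pass that swaps selected characters in place.
import Mathlib
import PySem

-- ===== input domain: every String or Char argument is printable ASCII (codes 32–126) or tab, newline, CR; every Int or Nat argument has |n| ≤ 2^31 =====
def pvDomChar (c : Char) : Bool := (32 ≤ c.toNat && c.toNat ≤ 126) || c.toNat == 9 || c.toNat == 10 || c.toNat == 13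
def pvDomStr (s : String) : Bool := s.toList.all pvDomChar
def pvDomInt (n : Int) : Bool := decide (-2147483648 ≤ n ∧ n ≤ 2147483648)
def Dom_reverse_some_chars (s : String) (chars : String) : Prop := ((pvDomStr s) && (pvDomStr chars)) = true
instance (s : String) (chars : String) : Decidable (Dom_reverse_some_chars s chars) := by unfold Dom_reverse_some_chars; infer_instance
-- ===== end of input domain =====

-- B replaces A's stack-collect-then-rebuild (two passes plus an auxiliary stack list) with a
-- single converging two-pointer in-place swap pass; objective: alternative (same O(n) cost).

-- ===== PORT A =====
-- literal port of A: build chars_set, push each selected char on a stack in a first pass,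
-- then rebuild, popping from the stack at each selected position.
def reverse_some_chars (s : String) (chars : String) : String :=
  let chars_set : PySem.Set Char := PySem.Set.ofList chars.toList
  let stack : List Char :=
    s.toList.foldl (fun st ch => if PySem.Set.contains chars_set ch then st ++ [ch] else st) []
  let res : List Char :=
    (s.toList.foldl
      (fun (acc : List Char × List Char) ch =>
        if PySem.Set.contains chars_set ch then
          match PySem.List.pop? acc.1 (-1) with
          | some (v, st') => (st', acc.2 ++ [v])
          | none => (acc.1, acc.2)   -- Python would raise IndexError here; unreachable (stack holds exactly the selected chars)
        else (acc.1, acc.2 ++ [ch]))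
      (stack, [])).2
  String.mk res

-- ===== PORT B =====
-- the two-pointer while-loop of Source B; indices stay in range throughout, so List.getD is exact.
-- j starts at len-1 (Nat subtraction: for the empty string Python has j = -1 and the loop body
-- never runs, exactly as with the clamped j = 0 here, since i < j fails either way).
def pvSwapLoop (cset : PySem.Set Char) (lst : List Char) (i j : Nat) : List Char :=
  if h : i < j then
    if ¬ PySem.Set.contains cset (lst.getD i ' ') then
      pvSwapLoop cset lst (i + 1) j
    else if ¬ PySem.Set.contains cset (lst.getD j ' ') then
      pvSwapLoop cset lst i (j - 1)
    else
      pvSwapLoop cset ((lst.set i (lst.getD j ' ')).set j (lst.getD i ' ')) (i + 1) (j - 1)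
  else lst
termination_by j - i
decreasing_by all_goals omega

def reverse_some_chars_alt (s : String) (chars : String) : String :=
  let chars_set : PySem.Set Char := PySem.Set.ofList chars.toList
  String.mk (pvSwapLoop chars_set s.toList 0 (s.toList.length - 1))

-- ===== PRECONDITION & SPEC =====
def Spec_reverse_some_chars (s : String) (chars : String) (out : String) : Prop := out = reverse_some_chars_alt s chars
instance (s : String) (chars : String) (out : String) : Decidable (Spec_reverse_some_chars s chars out) := by unfold Spec_reverse_some_chars; infer_instance

-- ===== CLAIM (what is proved, stated in full; the proofs are below) =====
def Claim_equal_reverse_some_chars : Prop := ∀ (s : String) (chars : String), Dom_reverse_some_chars s chars → Spec_reverse_some_chars s chars (reverse_some_chars s chars)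

-- ===== LEMMAS AND PROOFS =====

-- reference function: replace each selected char of the first list by the next char of r
def pvFill (p : Char → Bool) : List Char → List Char → List Char
  | [], _ => []
  | c :: cs, r => if p c then r.headD c :: pvFill p cs r.tail else c :: pvFill p cs r

theorem pvFill_append (p : Char → Bool) (xs : List Char) : ∀ (ys r : List Char),
    pvFill p (xs ++ ys) r = pvFill p xs r ++ pvFill p ys (r.drop (xs.countP p)) := by
  induction xs with
  | nil => intro ys r; simp [pvFill]
  | cons c cs ih =>
    intro ys r
    by_cases h : p c
    · simp [pvFill, h, ih]
    · simp [pvFill, h, ih, List.countP_cons]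

theorem pvFill_extra (p : Char → Bool) (xs : List Char) : ∀ (r1 r2 : List Char),
    xs.countP p ≤ r1.length → pvFill p xs (r1 ++ r2) = pvFill p xs r1 := by
  induction xs with
  | nil => intro r1 r2 h; simp [pvFill]
  | cons c cs ih =>
    intro r1 r2 h
    rw [List.countP_cons] at h
    by_cases hc : p c
    · cases r1 with
      | nil => simp [hc] at h
      | cons a r1' =>
        have : cs.countP p ≤ r1'.length := by simp [hc] at h; omega
        simp [pvFill, hc, ih r1' r2 this]
    · simp [pvFill, hc, ih r1 r2 (by simp [hc] at h; omega)]

theorem pvGetD_append_len (pre : List Char) (x : Char) (t : List Char) (d : Char) :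
    (pre ++ x :: t).getD pre.length d = x := by
  induction pre with
  | nil => simp [List.getD]
  | cons a pre ih => simpa [List.getD] using ih

theorem pvSet_append_len (pre : List Char) (v x : Char) (t : List Char) :
    (pre ++ x :: t).set pre.length v = pre ++ v :: t := by
  induction pre with
  | nil => simp
  | cons a pre ih => simp [ih]

-- the two-pointer loop on pre ++ mid ++ post, entered at the ends of mid, returns mid with
-- its selected chars replaced by the reversed list of selected chars (pvFill)
theorem pvSwapLoop_eq (cset : PySem.Set Char) : ∀ (n : Nat) (mid pre post : List Char) (i j : Nat),
    mid.length ≤ n → i = pre.length → j + 1 = pre.length + mid.length →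
    pvSwapLoop cset (pre ++ mid ++ post) i j =
      pre ++ pvFill (fun c => PySem.Set.contains cset c) mid
              ((mid.filter (fun c => PySem.Set.contains cset c)).reverse) ++ post := by
  intro n
  induction n with
  | zero =>
    intro mid pre post i j hn hi hj
    have hmid : mid = [] := by cases mid <;> simp_all
    subst hmid
    rw [pvSwapLoop, dif_neg (by omega)]
    simp [pvFill]
  | succ n ih =>
    intro mid pre post i j hn hi hj
    match mid with
    | [] =>
      rw [pvSwapLoop, dif_neg (by simp at hj; omega)]
      simp [pvFill]
    | [c] =>
      rw [pvSwapLoop, dif_neg (by simp at hj; omega)]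
      simp [pvFill]
      split_ifs <;> simp
    | x :: r0 :: rr =>
      set p : Char → Bool := fun c => PySem.Set.contains cset c with hp
      obtain ⟨mid', y, hrest⟩ : ∃ mid' y, r0 :: rr = mid' ++ [y] :=
        ⟨(r0 :: rr).dropLast, (r0 :: rr).getLast (by simp),
          (List.dropLast_append_getLast (by simp)).symm⟩
      have hmlen : (r0 :: rr).length = mid'.length + 1 := by rw [hrest]; simp
      have hlen2 : (x :: r0 :: rr).length = mid'.length + 2 := by simp [hmlen]
      have hij : i < j := by simp [hlen2] at hj; omega
      have hl1 : pre ++ (x :: r0 :: rr) ++ post = pre ++ x :: ((mid' ++ [y]) ++ post) := by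
        simp [hrest]
      have hl2 : pre ++ (x :: r0 :: rr) ++ post = (pre ++ x :: mid') ++ y :: post := by
        simp [hrest]
      have hjlen : j = (pre ++ x :: mid').length := by simp [hlen2] at hj ⊢; omega
      have hx : (pre ++ (x :: r0 :: rr) ++ post).getD i ' ' = x := by
        rw [hl1, hi]; exact pvGetD_append_len ..
      have hy : (pre ++ (x :: r0 :: rr) ++ post).getD j ' ' = y := by
        rw [hl2, hjlen]; exact pvGetD_append_len ..
      have hfilter : ∀ l : List Char, (l.filter p).length = l.countP p := by
        intro l; rw [List.countP_eq_length_filter]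
      have hA : mid'.length = rr.length := by have := hmlen; simp at this; omega
      have hn' : rr.length + 2 ≤ n + 1 := by simpa using hn
      have hj' : j + 1 = pre.length + (rr.length + 2) := by simpa using hj
      rw [pvSwapLoop, dif_pos hij, hx, hy]
      by_cases hpx : p x
      · by_cases hpy : p y
        · -- swap case
          rw [if_neg (by simp [hp] at hpx; simp [hpx]), if_neg (by simp [hp] at hpy; simp [hpy])]
          have hswap : ((pre ++ (x :: r0 :: rr) ++ post).set i y).set j x
              = (pre ++ [y]) ++ mid' ++ (x :: post) := by
            rw [hl1, hi, pvSet_append_len]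
            have : pre ++ y :: ((mid' ++ [y]) ++ post) = (pre ++ y :: mid') ++ y :: post := by
              simp
            rw [this]
            have hjlen' : j = (pre ++ y :: mid').length := by
              simpa using hjlen
            rw [hjlen', pvSet_append_len]
            simp
          rw [hswap, ih mid' (pre ++ [y]) (x :: post) (i+1) (j-1)
              (by omega) (by simp [hi]) (by simp; omega)]
          have hfil : (x :: r0 :: rr).filter p = x :: mid'.filter p ++ [y] := by
            rw [hrest]; simp [List.filter_cons, hpx, List.filter_append, hpy]
          have hfill : pvFill p (x :: r0 :: rr) (((x :: r0 :: rr).filter p).reverse)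
              = y :: pvFill p mid' ((mid'.filter p).reverse) ++ [x] := by
            rw [hfil, hrest]
            have hrev : (x :: mid'.filter p ++ [y]).reverse
                = y :: (mid'.filter p).reverse ++ [x] := by simp
            rw [hrev]
            show pvFill p (x :: (mid' ++ [y])) (y :: ((mid'.filter p).reverse ++ [x])) = _
            rw [pvFill]
            rw [if_pos hpx]
            simp only [List.headD_cons, List.tail_cons]
            rw [pvFill_append]
            have hdrop : ((mid'.filter p).reverse ++ [x]).drop (mid'.countP p) = [x] := by
              rw [show mid'.countP p = (mid'.filter p).reverse.length by simp [hfilter]]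
              simp
            rw [hdrop, pvFill_extra p mid' ((mid'.filter p).reverse) [x] (by simp [hfilter])]
            simp [pvFill, hpy]
          rw [hfill]
          simp
        · -- advance j
          rw [if_neg (by simp [hp] at hpx; simp [hpx]), if_pos (by simp [hp] at hpy; simp [hpy])]
          rw [show pre ++ (x :: r0 :: rr) ++ post = pre ++ (x :: mid') ++ (y :: post) by
            simp [hrest]]
          rw [ih (x :: mid') pre (y :: post) i (j-1)
              (by simp; omega) hi (by simp; omega)]
          have hfil : (x :: r0 :: rr).filter p = (x :: mid').filter p := by
            rw [hrest]; simp [List.filter_cons, hpx, List.filter_append, hpy]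
          have hfill : pvFill p (x :: r0 :: rr) (((x :: r0 :: rr).filter p).reverse)
              = pvFill p (x :: mid') (((x :: mid').filter p).reverse) ++ [y] := by
            rw [hfil, hrest]
            show pvFill p ((x :: mid') ++ [y]) (((x :: mid').filter p).reverse) = _
            rw [pvFill_append]
            simp [pvFill, hpy]
          rw [hfill]
          simp
      · -- advance i
        rw [if_pos (by simp [hp] at hpx; simp [hpx])]
        rw [show pre ++ (x :: r0 :: rr) ++ post = (pre ++ [x]) ++ (r0 :: rr) ++ post by simp]
        rw [ih (r0 :: rr) (pre ++ [x]) post (i+1) j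
            (by simp; omega) (by simp [hi]) (by simp; omega)]
        have hfil : (x :: r0 :: rr).filter p = (r0 :: rr).filter p := by
          simp [List.filter_cons, hpx]
        have hfill : pvFill p (x :: r0 :: rr) (((x :: r0 :: rr).filter p).reverse)
            = x :: pvFill p (r0 :: rr) (((r0 :: rr).filter p).reverse) := by
          rw [hfil, pvFill, if_neg (by simp [hpx])]
        rw [hfill]
        simp

theorem pvStack_eq (p : Char → Bool) (l : List Char) : ∀ acc : List Char,
    l.foldl (fun st ch => if p ch then st ++ [ch] else st) acc = acc ++ l.filter p := by
  induction l with
  | nil => intro acc; simp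
  | cons c cs ih =>
    intro acc
    by_cases h : p c
    · simp [List.foldl_cons, h, ih]
    · simp [List.foldl_cons, h, ih]

theorem pvRun_eq (p : Char → Bool) (l : List Char) : ∀ (st res : List Char),
    l.countP p ≤ st.length →
    (l.foldl
      (fun (acc : List Char × List Char) ch =>
        if p ch then
          match PySem.List.pop? acc.1 (-1) with
          | some (v, st') => (st', acc.2 ++ [v])
          | none => (acc.1, acc.2)
        else (acc.1, acc.2 ++ [ch]))
      (st, res)).2 = res ++ pvFill p l st.reverse := by
  induction l with
  | nil => intro st res h; simp [pvFill]
  | cons c cs ih =>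
    intro st res h
    rw [List.countP_cons] at h
    by_cases hc : p c
    · simp [hc] at h
      have hne : st ≠ [] := by intro e; subst e; simp at h
      obtain ⟨d, g, rfl⟩ : ∃ d g, st = d ++ [g] :=
        ⟨st.dropLast, st.getLast hne, (List.dropLast_append_getLast hne).symm⟩
      have hlen : cs.countP p ≤ d.length := by simp at h; omega
      simp [List.foldl_cons, hc, PySem.List.pop?_last, ih d (res ++ [g]) hlen, pvFill]
    · simp [List.foldl_cons, hc, ih st (res ++ [c]) (by omega), pvFill]

theorem reverse_some_chars_eq_fill (s chars : String) :
    reverse_some_chars s chars =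
      String.mk (pvFill (fun c => PySem.Set.contains (PySem.Set.ofList chars.toList) c) s.toList
        ((s.toList.filter (fun c => PySem.Set.contains (PySem.Set.ofList chars.toList) c)).reverse)) := by
  set p : Char → Bool := fun c => PySem.Set.contains (PySem.Set.ofList chars.toList) c with hp
  show String.mk _ = _
  congr 1
  rw [pvStack_eq p s.toList []]
  rw [pvRun_eq p s.toList ([] ++ s.toList.filter p) []
    (by simp [List.countP_eq_length_filter])]
  simp

theorem alt_eq_fill (s chars : String) :
    reverse_some_chars_alt s chars =
      String.mk (pvFill (fun c => PySem.Set.contains (PySem.Set.ofList chars.toList) c) s.toList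
        ((s.toList.filter (fun c => PySem.Set.contains (PySem.Set.ofList chars.toList) c)).reverse)) := by
  show String.mk _ = _
  congr 1
  cases hS : s.toList with
  | nil => rw [pvSwapLoop, dif_neg (by simp)]; simp [pvFill]
  | cons a t =>
    have := pvSwapLoop_eq (PySem.Set.ofList chars.toList) (a :: t).length (a :: t) [] []
      0 ((a :: t).length - 1) (le_refl _) (by simp) (by simp)
    simpa using this

-- ===== VERDICT (by name: the statement is the Claim_ definition above) =====
theorem reverse_some_chars_spec : Claim_equal_reverse_some_chars := by
  intro s chars _
  unfold Spec_reverse_some_chars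
  rw [reverse_some_chars_eq_fill, alt_eq_fill]
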